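-- pv_equiv track=rewrite | github.com/AnaSjj/exam2 | task-3/main.py | check
-- ===== SOURCE A (Python) =====
-- def check(list_):
--     list_len = len(list_)
--     if list_ and list_len > 1:
--         increasing = all([list_[i] < list_[i+1] for i in range(list_len - 1)])
--         decreasing = all([list_[i] > list_[i+1] for i in range(list_len - 1)])
--         if increasing:
--             return "increasing"
--         if decreasing:
--             return "decreasing"
--     return "neither"
-- ===== SOURCE B (Python) =====
-- def check(list_):
--     if list_ and len(list_) > 1:
--         asc = sorted(list_)
--         desc = sorted(list_, reverse=True)
--         distinct = len(set(list_)) == len(list_)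
--         if distinct and list_ == asc:
--             return "increasing"
--         if distinct and list_ == desc:
--             return "decreasing"
--     return "neither"
-- ===== Notes on version B (the rewrite author's own statement) =====
-- stated objective: idiomatic
-- what changed: Replaces A's two index-based pairwise comparison scans with sort-and-compare: strictly monotone iff the list equals its sorted (or reverse-sorted) version and has no duplicates (checked via set size).
import Mathlib
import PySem

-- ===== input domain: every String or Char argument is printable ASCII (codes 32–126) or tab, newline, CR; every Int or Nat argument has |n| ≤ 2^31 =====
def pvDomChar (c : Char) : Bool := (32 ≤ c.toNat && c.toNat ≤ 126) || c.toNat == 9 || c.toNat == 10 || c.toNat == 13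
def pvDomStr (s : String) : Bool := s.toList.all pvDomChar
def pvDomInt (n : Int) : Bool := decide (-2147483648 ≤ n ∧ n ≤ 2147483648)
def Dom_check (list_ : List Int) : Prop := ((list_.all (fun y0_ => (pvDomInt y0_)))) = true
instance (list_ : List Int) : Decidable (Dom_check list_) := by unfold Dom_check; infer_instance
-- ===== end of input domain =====

-- B replaces A's two adjacent-pair index scans with the idiomatic sort-and-compare:
-- strictly monotone iff the list equals its sorted version and has distinct elements.


-- ===== PORT A =====
def check (list_ : List Int) : String :=
  let list_len := list_.length
  if list_ ≠ [] ∧ list_len > 1 then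
    let increasing := ((PySem.List.pyRange 0 ((list_len : Int) - 1) 1).map
        (fun i => decide (PySem.List.pyGetD list_ i 0 < PySem.List.pyGetD list_ (i + 1) 0))).all id
    let decreasing := ((PySem.List.pyRange 0 ((list_len : Int) - 1) 1).map
        (fun i => decide (PySem.List.pyGetD list_ i 0 > PySem.List.pyGetD list_ (i + 1) 0))).all id
    if increasing then "increasing"
    else if decreasing then "decreasing"
    else "neither"
  else "neither"

-- ===== PORT B =====
def check_alt (list_ : List Int) : String :=
  if list_ ≠ [] ∧ list_.length > 1 then
    let asc := PySem.List.sorted list_ (fun x => x)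
    let desc := PySem.List.sorted list_ (fun x => x) true
    let distinct := (PySem.Set.ofList list_).length == list_.length
    if distinct && (list_ == asc) then "increasing"
    else if distinct && (list_ == desc) then "decreasing"
    else "neither"
  else "neither"

-- ===== PRECONDITION & SPEC =====
def Spec_check (list_ : List Int) (out : String) : Prop := out = check_alt list_
instance (list_ : List Int) (out : String) : Decidable (Spec_check list_ out) := by unfold Spec_check; infer_instance

-- ===== CLAIM (what is proved, stated in full; the proofs are below) =====
def Claim_equal_check : Prop := ∀ (list_ : List Int), Dom_check list_ → Spec_check list_ (check list_)

-- ===== LEMMAS AND PROOFS =====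

-- A's 'all' over adjacent pairs says exactly: every adjacent pair satisfies r.
theorem adj_all_iff (r : Int → Int → Prop) [DecidableRel r] (xs : List Int) :
    (((PySem.List.pyRange 0 ((xs.length : Int) - 1) 1).map
        (fun i => decide (r (PySem.List.pyGetD xs i 0) (PySem.List.pyGetD xs (i + 1) 0)))).all id = true)
    ↔ ∀ (i : Nat), i + 1 < xs.length → r xs[i]! xs[i + 1]! := by
  simp only [List.all_eq_true, List.mem_map, id_eq, PySem.List.mem_pyRange_one]
  constructor
  · intro h i hi
    have h0 : (0 : Int) ≤ (i : Int) := by positivity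
    have h1 : (i : Int) < (xs.length : Int) - 1 := by omega
    have := h _ ⟨(i : Int), ⟨h0, h1⟩, rfl⟩
    rw [PySem.List.pyGetD_eq_getElem _ _ h0 (by omega),
        show ((i : Int) + 1) = ((i + 1 : Nat) : Int) by push_cast; ring,
        PySem.List.pyGetD_eq_getElem _ _ (by positivity) (by omega)] at this
    simp only [decide_eq_true_eq] at this
    simpa [List.getElem!_eq_getElem?_getD, List.getElem?_eq_getElem, hi, Nat.lt_of_succ_lt hi] using this
  · intro h b ⟨i, ⟨h0, h1⟩, hb⟩
    subst hb
    have hi : i.toNat + 1 < xs.length := by omega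
    have hv := h i.toNat hi
    rw [PySem.List.pyGetD_eq_getElem _ _ h0 (by omega),
        show (i + 1) = ((i.toNat + 1 : Nat) : Int) by omega,
        PySem.List.pyGetD_eq_getElem _ _ (by positivity) (by omega)]
    simp only [Int.toNat_natCast]
    simpa [List.getElem!_eq_getElem?_getD, List.getElem?_eq_getElem, hi, Nat.lt_of_succ_lt hi] using hv

theorem adj_iff_pairwise (r : Int → Int → Prop) [IsTrans Int r] (xs : List Int) :
    (∀ (i : Nat), i + 1 < xs.length → r xs[i]! xs[i + 1]!) ↔ xs.Pairwise r := by
  rw [← List.isChain_iff_pairwise, List.isChain_iff_getElem]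
  constructor
  · intro h i hi
    have := h i (by omega)
    simpa [List.getElem!_eq_getElem?_getD, List.getElem?_eq_getElem, hi,
      show i < xs.length by omega, show i + 1 < xs.length by omega] using this
  · intro h i hi
    have := h i (by omega)
    simpa [List.getElem!_eq_getElem?_getD, List.getElem?_eq_getElem, hi,
      show i < xs.length by omega, show i + 1 < xs.length by omega] using this

theorem ofList_sublist (xs : List Int) : (PySem.Set.ofList xs).Sublist xs := by
  induction xs with
  | nil => simp [PySem.Set.ofList]
  | cons x xs ih =>
    rw [PySem.Set.ofList_cons]
    exact List.Sublist.cons₂ x (List.Sublist.trans List.filter_sublist ih)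

theorem distinct_iff_nodup (xs : List Int) :
    (PySem.Set.ofList xs).length = xs.length ↔ xs.Nodup := by
  constructor
  · intro h
    have := List.Sublist.eq_of_length (ofList_sublist xs) h
    rw [← this]; exact PySem.Set.nodup_ofList xs
  · intro h; rw [PySem.Set.ofList_eq_self_of_nodup xs h]

theorem pairwise_lt_iff_sorted (xs : List Int) :
    xs.Pairwise (· < ·) ↔ (xs.Nodup ∧ PySem.List.sorted xs (fun x => x) = xs) := by
  constructor
  · intro h
    exact ⟨h.imp ne_of_lt, PySem.List.sorted_eq_of_perm_of_pairwise_lt xs xs _ (List.Perm.refl xs) h⟩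
  · intro ⟨hn, hs⟩
    have hle := PySem.List.sorted_pairwise xs (fun x => x)
    rw [hs] at hle
    exact (hle.and hn).imp (fun ⟨h1, h2⟩ => lt_of_le_of_ne h1 h2)

theorem pairwise_gt_iff_sorted_rev (xs : List Int) :
    xs.Pairwise (· > ·) ↔ (xs.Nodup ∧ PySem.List.sorted xs (fun x => x) true = xs) := by
  constructor
  · intro h
    exact ⟨h.imp ne_of_gt, PySem.List.sorted_rev_eq_of_perm_of_pairwise_gt xs xs _ (List.Perm.refl xs) h⟩
  · intro ⟨hn, hs⟩
    have hle := PySem.List.sorted_pairwise_rev xs (fun x => x)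
    rw [hs] at hle
    exact (hle.and hn).imp (fun ⟨h1, h2⟩ => lt_of_le_of_ne h1 (Ne.symm h2))

-- ===== VERDICT (by name: the statement is the Claim_ definition above) =====
theorem check_spec : Claim_equal_check := by
  intro list_ _
  unfold Spec_check check check_alt
  by_cases hg : list_ ≠ [] ∧ list_.length > 1
  · rw [if_pos hg, if_pos hg]
    have hi : (((PySem.List.pyRange 0 ((list_.length : Int) - 1) 1).map
        (fun i => decide (PySem.List.pyGetD list_ i 0 < PySem.List.pyGetD list_ (i + 1) 0))).all id = true)
        ↔ ((PySem.Set.ofList list_).length == list_.length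
            && (list_ == PySem.List.sorted list_ (fun x => x))) = true := by
      rw [adj_all_iff (· < ·), adj_iff_pairwise (· < ·), pairwise_lt_iff_sorted]
      simp only [Bool.and_eq_true, beq_iff_eq, distinct_iff_nodup]
      exact ⟨fun ⟨a, b⟩ => ⟨a, b.symm⟩, fun ⟨a, b⟩ => ⟨a, b.symm⟩⟩
    have hd : (((PySem.List.pyRange 0 ((list_.length : Int) - 1) 1).map
        (fun i => decide (PySem.List.pyGetD list_ i 0 > PySem.List.pyGetD list_ (i + 1) 0))).all id = true)
        ↔ ((PySem.Set.ofList list_).length == list_.length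
            && (list_ == PySem.List.sorted list_ (fun x => x) true)) = true := by
      rw [adj_all_iff (· > ·), adj_iff_pairwise (· > ·), pairwise_gt_iff_sorted_rev]
      simp only [Bool.and_eq_true, beq_iff_eq, distinct_iff_nodup]
      exact ⟨fun ⟨a, b⟩ => ⟨a, b.symm⟩, fun ⟨a, b⟩ => ⟨a, b.symm⟩⟩
    rw [show (((PySem.List.pyRange 0 ((list_.length : Int) - 1) 1).map
          (fun i => decide (PySem.List.pyGetD list_ i 0 < PySem.List.pyGetD list_ (i + 1) 0))).all id)
        = ((PySem.Set.ofList list_).length == list_.length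
            && (list_ == PySem.List.sorted list_ (fun x => x))) from
        by rw [Bool.eq_iff_iff]; exact hi,
      show (((PySem.List.pyRange 0 ((list_.length : Int) - 1) 1).map
          (fun i => decide (PySem.List.pyGetD list_ i 0 > PySem.List.pyGetD list_ (i + 1) 0))).all id)
        = ((PySem.Set.ofList list_).length == list_.length
            && (list_ == PySem.List.sorted list_ (fun x => x) true)) from
        by rw [Bool.eq_iff_iff]; exact hd]
  · rw [if_neg hg, if_neg hg]
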